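-- pv_equiv track=rewrite | github.com/EgeniyKiselev/codefights | src/main/python/loop_tunnel.py | rounders
-- ===== SOURCE A (Python) =====
-- def rounders(value):
--     res = 0
--     add = 0
--     i = 0
--     value = int(value)
--     while value != 0:
--         if value // 10 == 0:
--             res = int(value + add) * (10 ** i)
--             break
--
--         r = value % 10 + add
--         if r == 0:
--             i += 1
--             value //= 10
--             continue
--         if r >= 5:
--             add = 1
--         else:
--             add = 0
--         value //= 10
--         i += 1
--
--     return res
-- ===== SOURCE B (Python) =====
-- def rounders(value):
--     value = int(value)
--     if value < 10:
--         return value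
--     carry = 1 if value % 10 >= 5 else 0
--     return rounders(value // 10 + carry) * 10
-- ===== Notes on version B (the rewrite author's own statement) =====
-- stated objective: simpler
-- what changed: Replaced the explicit while-loop with accumulator state (res, add, i) by a short digit recursion that threads the rounding carry into the recursive call and rebuilds the result by multiplying by 10.
import Mathlib
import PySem

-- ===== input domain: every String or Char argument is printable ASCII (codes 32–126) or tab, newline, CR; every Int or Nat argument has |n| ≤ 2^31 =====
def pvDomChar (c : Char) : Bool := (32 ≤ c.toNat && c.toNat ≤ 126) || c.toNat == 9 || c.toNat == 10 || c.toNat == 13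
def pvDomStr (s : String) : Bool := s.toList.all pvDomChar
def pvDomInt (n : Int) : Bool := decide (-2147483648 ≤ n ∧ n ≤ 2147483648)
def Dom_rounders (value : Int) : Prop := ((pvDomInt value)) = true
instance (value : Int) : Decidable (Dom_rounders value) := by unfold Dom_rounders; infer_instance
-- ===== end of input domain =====

-- B replaces A's while-loop with accumulator state (res, add, i) by a short digit
-- recursion threading the carry into the recursive call (objective: simpler).

-- ===== PORT A =====
-- A's while-loop as structural recursion on value.toNat; the `value ≤ 0` guard only
-- makes the recursion total: Python never terminates for negative value (excluded by Pre_)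
-- and for value = 0 the loop body never runs, so res = 0 is returned.
def roundersA_loop (add : Int) (i : Nat) (value : Int) : Int :=
  if h : value ≤ 0 then 0
  else if PySem.Int.floordiv value 10 = 0 then (value + add) * 10 ^ i
  else
    let r := PySem.Int.mod value 10 + add
    if r = 0 then roundersA_loop add (i + 1) (PySem.Int.floordiv value 10)
    else roundersA_loop (if r ≥ 5 then 1 else 0) (i + 1) (PySem.Int.floordiv value 10)
termination_by value.toNat
decreasing_by
  all_goals
    rw [PySem.Int.floordiv_eq_ediv_of_pos (by omega : (0:Int) < 10)]
    omega

def rounders (value : Int) : Int := roundersA_loop 0 0 value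

-- ===== PORT B =====
def rounders_alt (value : Int) : Int :=
  if h : value < 10 then value
  else
    let carry : Int := if PySem.Int.mod value 10 ≥ 5 then 1 else 0
    rounders_alt (PySem.Int.floordiv value 10 + carry) * 10
termination_by value.toNat
decreasing_by
  rw [PySem.Int.floordiv_eq_ediv_of_pos (by omega : (0:Int) < 10)]
  split <;> omega

-- ===== PRECONDITION & SPEC =====
-- Pre_ excludes negative inputs: on every negative integer A's while-loop never
-- terminates (value //= 10 stalls at -1), so A returns no value there.
def Pre_rounders (value : Int) : Prop := 0 ≤ value
instance (value : Int) : Decidable (Pre_rounders value) := by unfold Pre_rounders; infer_instance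
def pvWitness_rounders : Int := 149

def Spec_rounders (value : Int) (out : Int) : Prop := out = rounders_alt value
instance (value : Int) (out : Int) : Decidable (Spec_rounders value out) := by unfold Spec_rounders; infer_instance

-- ===== CLAIM =====
def Claim_equal_rounders : Prop := ∀ (value : Int), Dom_rounders value → Pre_rounders value → Spec_rounders value (rounders value)

-- ===== LEMMAS AND PROOFS =====

theorem roundersA_loop_eq (add : Int) (i : Nat) (value : Int)
    (hv : 1 ≤ value) (ha : add = 0 ∨ add = 1) :
    roundersA_loop add i value = rounders_alt (value + add) * 10 ^ i := by
  induction hn : value.toNat using Nat.strong_induction_on generalizing add i value with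
  | _ n ih =>
  rw [roundersA_loop]
  rw [PySem.Int.floordiv_eq_ediv_of_pos (by omega : (0:Int) < 10),
      PySem.Int.mod_eq_emod_of_pos (by omega : (0:Int) < 10)]
  rw [dif_neg (show ¬ value ≤ 0 by omega)]
  by_cases hsmall : value / 10 = 0
  · -- 1 ≤ value ≤ 9 : loop returns (value+add)*10^i
    rw [if_pos hsmall]
    have hv9 : value ≤ 9 := by omega
    by_cases h10 : value + add < 10
    · rw [rounders_alt, dif_pos h10]
    · -- value = 9, add = 1: rounders_alt 10 = 10
      have hva : value + add = 10 := by omega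
      have e1 : rounders_alt 1 = 1 := by rw [rounders_alt]; norm_num
      have e10 : rounders_alt 10 = 10 := by
        rw [rounders_alt, dif_neg (by norm_num),
            PySem.Int.floordiv_eq_ediv_of_pos (show (0:Int) < 10 by norm_num),
            PySem.Int.mod_eq_emod_of_pos (show (0:Int) < 10 by norm_num)]
        norm_num [e1]
      rw [hva, e10]
  · rw [if_neg hsmall]
    have hq1 : 1 ≤ value / 10 := by omega
    have hqlt : (value / 10).toNat < n := by omega
    have hd0 : 0 ≤ value % 10 := by omega
    have hd9 : value % 10 ≤ 9 := by omega
    by_cases hr0 : value % 10 + add = 0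
    · -- r = 0 : add = 0, last digit 0
      rw [if_pos hr0]
      have hadd : add = 0 := by omega
      rw [ih (value / 10).toNat hqlt add (i + 1) (value / 10) hq1 ha rfl]
      -- RHS: unfold rounders_alt at value (+ add = 0)
      conv_rhs => rw [rounders_alt]
      rw [hadd]
      have h10 : ¬ value + 0 < 10 := by omega
      rw [dif_neg h10]
      rw [PySem.Int.floordiv_eq_ediv_of_pos (by omega : (0:Int) < 10),
          PySem.Int.mod_eq_emod_of_pos (by omega : (0:Int) < 10)]
      have hmod : (value + 0) % 10 = 0 := by omega
      have hdivq : (value + 0) / 10 = value / 10 := by omega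
      rw [hmod, hdivq]
      rw [if_neg (by omega)]
      ring
    · rw [if_neg hr0]
      set add' : Int := if value % 10 + add ≥ 5 then 1 else 0 with hadd'
      have ha' : add' = 0 ∨ add' = 1 := by
        rw [hadd']; split <;> simp
      rw [ih (value / 10).toNat hqlt add' (i + 1) (value / 10) hq1 ha' rfl]
      conv_rhs => rw [rounders_alt]
      rw [dif_neg (by omega : ¬ value + add < 10)]
      rw [PySem.Int.floordiv_eq_ediv_of_pos (by omega : (0:Int) < 10),
          PySem.Int.mod_eq_emod_of_pos (by omega : (0:Int) < 10)]
      set c : Int := if (value + add) % 10 ≥ 5 then 1 else 0 with hc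
      have key : (value + add) / 10 + c = value / 10 + add' := by
        by_cases hcarry : value % 10 + add ≤ 9
        · have hm : (value + add) % 10 = value % 10 + add := by omega
          have hd : (value + add) / 10 = value / 10 := by omega
          rw [hc, hadd', hm, hd]
        · -- value % 10 = 9, add = 1
          have hm : (value + add) % 10 = 0 := by omega
          have hd : (value + add) / 10 = value / 10 + 1 := by omega
          rw [hc, hadd', hm, hd]
          rw [if_neg (by omega), if_pos (by omega)]
          ring
      have hbeta : (have carry := c; rounders_alt ((value + add) / 10 + carry) * 10)
          = rounders_alt ((value + add) / 10 + c) * 10 := rfl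
      rw [hbeta, key]
      ring

theorem rounders_spec : Claim_equal_rounders := by
  intro value _ hpre
  unfold Spec_rounders rounders
  by_cases h0 : value = 0
  · subst h0
    rw [roundersA_loop, dif_pos (by norm_num), rounders_alt, dif_pos (by norm_num)]
  · rw [roundersA_loop_eq 0 0 value (by unfold Pre_rounders at hpre; omega) (Or.inl rfl)]
    simp
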